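-- pv_equiv track=rewrite | github.com/Remco28/todoist_telegram | backend/api/main.py | _has_term_overlap
-- ===== SOURCE A (Python) =====
-- def _has_term_overlap(title_terms: set[str], msg_terms: set[str]) -> bool:
--     for m in msg_terms:
--         if len(m) < 4:
--             continue
--         for t in title_terms:
--             if len(t) < 4:
--                 continue
--             if m == t or m.startswith(t) or t.startswith(m):
--                 return True
--     return False
-- ===== SOURCE B (Python) =====
-- def _has_term_overlap(title_terms: set[str], msg_terms: set[str]) -> bool:
--     titles4 = {t for t in title_terms if len(t) >= 4}
--     title_prefixes = {t[:i] for t in titles4 for i in range(4, len(t) + 1)}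
--     for m in msg_terms:
--         if len(m) < 4:
--             continue
--         if m in title_prefixes:
--             return True
--         if any(m[:i] in titles4 for i in range(4, len(m) + 1)):
--             return True
--     return False
-- ===== Notes on version B (the rewrite author's own statement) =====
-- stated objective: alternative
-- what changed: Replaces A's all-pairs nested scan (every msg term tested against every title term with startswith both ways) by set membership: B precomputes the set of length->=4 title terms and the set of all their length->=4 prefixes, then for each msg term checks membership of the term itself and of each of its prefixes, so no inner scan over title_terms remains.
import Mathlib
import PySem

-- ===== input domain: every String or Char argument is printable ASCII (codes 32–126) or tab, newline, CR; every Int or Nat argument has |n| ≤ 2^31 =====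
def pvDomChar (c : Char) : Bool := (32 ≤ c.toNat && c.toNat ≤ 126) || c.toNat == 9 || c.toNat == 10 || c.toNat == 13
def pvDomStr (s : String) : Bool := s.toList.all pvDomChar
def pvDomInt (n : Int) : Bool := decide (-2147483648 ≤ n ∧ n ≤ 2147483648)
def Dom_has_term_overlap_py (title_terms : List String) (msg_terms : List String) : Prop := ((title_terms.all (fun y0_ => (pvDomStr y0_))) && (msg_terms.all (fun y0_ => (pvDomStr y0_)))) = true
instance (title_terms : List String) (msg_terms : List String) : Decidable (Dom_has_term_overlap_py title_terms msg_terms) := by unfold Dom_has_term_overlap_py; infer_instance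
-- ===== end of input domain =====

-- B replaces A's all-pairs startswith scan by membership tests in precomputed sets of length-≥4 titles and their prefixes (alternative algorithm).

-- ===== PORT A =====
def has_term_overlap_py (title_terms : List String) (msg_terms : List String) : Bool :=
  msg_terms.any (fun m =>
    if PySem.Str.len m < 4 then false
    else title_terms.any (fun t =>
      if PySem.Str.len t < 4 then false
      else (m == t || PySem.Str.startswith m t || PySem.Str.startswith t m)))

-- ===== PORT B =====
-- t[:i] for i in range(4, len(t) + 1)
def pvPrefixes4 (t : String) : List String :=
  (PySem.List.pyRange 4 (PySem.Str.len t + 1) 1).map (fun i => PySem.Str.slice t none (some i))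

def has_term_overlap_py_alt (title_terms : List String) (msg_terms : List String) : Bool :=
  let titles4 : PySem.Set String :=
    PySem.Set.ofList (title_terms.filter (fun t => decide (4 ≤ PySem.Str.len t)))
  let title_prefixes : PySem.Set String :=
    PySem.Set.ofList (titles4.flatMap pvPrefixes4)
  msg_terms.any (fun m =>
    if PySem.Str.len m < 4 then false
    else
      PySem.Set.contains title_prefixes m ||
      (PySem.List.pyRange 4 (PySem.Str.len m + 1) 1).any
        (fun i => PySem.Set.contains titles4 (PySem.Str.slice m none (some i))))

-- ===== PRECONDITION & SPEC =====
def Spec_has_term_overlap_py (title_terms : List String) (msg_terms : List String) (out : Bool) : Prop := out = has_term_overlap_py_alt title_terms msg_terms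
instance (title_terms : List String) (msg_terms : List String) (out : Bool) : Decidable (Spec_has_term_overlap_py title_terms msg_terms out) := by unfold Spec_has_term_overlap_py; infer_instance

-- ===== CLAIM (what is proved, stated in full; the proofs are below) =====
def Claim_equal_has_term_overlap_py : Prop := ∀ (title_terms : List String) (msg_terms : List String), Dom_has_term_overlap_py title_terms msg_terms → Spec_has_term_overlap_py title_terms msg_terms (has_term_overlap_py title_terms msg_terms)

-- ===== LEMMAS AND PROOFS =====

-- the common specification: some msg term and title term, both of length ≥ 4, stand in a prefix relation
def pvOverlap (title_terms : List String) (msg_terms : List String) : Prop :=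
  ∃ m ∈ msg_terms, ∃ t ∈ title_terms,
    4 ≤ m.toList.length ∧ 4 ≤ t.toList.length ∧
    (m.toList <+: t.toList ∨ t.toList <+: m.toList)

theorem pv_A_iff (title_terms msg_terms : List String) :
    has_term_overlap_py title_terms msg_terms = true ↔ pvOverlap title_terms msg_terms := by
  unfold has_term_overlap_py pvOverlap
  rw [List.any_eq_true]
  constructor
  · rintro ⟨m, hm, hb⟩
    by_cases h4 : PySem.Str.len m < 4
    · rw [if_pos h4] at hb; cases hb
    · rw [if_neg h4, List.any_eq_true] at hb
      obtain ⟨t, ht, hb⟩ := hb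
      by_cases h4t : PySem.Str.len t < 4
      · rw [if_pos h4t] at hb; cases hb
      · rw [if_neg h4t] at hb
        rw [PySem.Str.len_eq] at h4 h4t
        refine ⟨m, hm, t, ht, by omega, by omega, ?_⟩
        simp only [Bool.or_eq_true, beq_iff_eq, PySem.Str.startswith_eq,
          PySem.Chars.startswith_iff] at hb
        rcases hb with (hb | hb) | hb
        · subst hb; exact Or.inl (List.prefix_refl _)
        · exact Or.inr hb
        · exact Or.inl hb
  · rintro ⟨m, hm, t, ht, h4m, h4t, hp⟩
    refine ⟨m, hm, ?_⟩
    rw [if_neg (by rw [PySem.Str.len_eq]; omega), List.any_eq_true]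
    refine ⟨t, ht, ?_⟩
    rw [if_neg (by rw [PySem.Str.len_eq]; omega)]
    simp only [Bool.or_eq_true, beq_iff_eq, PySem.Str.startswith_eq,
      PySem.Chars.startswith_iff]
    rcases hp with hp | hp
    · exact Or.inr hp
    · exact Or.inl (Or.inr hp)

-- x is one of t[4:], …, t[:len(t)]  ↔  x is a prefix of t of length ≥ 4
theorem pv_mem_prefixes4 (x t : String) :
    x ∈ pvPrefixes4 t ↔ 4 ≤ x.toList.length ∧ x.toList <+: t.toList := by
  unfold pvPrefixes4
  rw [List.mem_map]
  constructor
  · rintro ⟨i, hi, rfl⟩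
    rw [PySem.List.mem_pyRange_one, PySem.Str.len_eq] at hi
    have h0 : (0:Int) ≤ i := by omega
    have hts : (PySem.Str.slice t none (some i)).toList = t.toList.take i.toNat := by
      rw [PySem.Str.toList_slice, PySem.Chars.slice_eq_listSlice, PySem.List.slice_to _ h0]
    rw [hts]
    refine ⟨?_, List.take_prefix _ _⟩
    rw [List.length_take]
    omega
  · rintro ⟨h4, hp⟩
    refine ⟨(x.toList.length : Int), ?_, ?_⟩
    · rw [PySem.List.mem_pyRange_one, PySem.Str.len_eq]
      have := hp.length_le
      omega
    · apply String.toList_inj.mp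
      rw [PySem.Str.toList_slice, PySem.Chars.slice_eq_listSlice,
        PySem.List.slice_to _ (by omega), Int.toNat_natCast]
      exact (List.prefix_iff_eq_take.mp hp).symm

theorem pv_B_iff (title_terms msg_terms : List String) :
    has_term_overlap_py_alt title_terms msg_terms = true ↔ pvOverlap title_terms msg_terms := by
  unfold has_term_overlap_py_alt pvOverlap
  rw [List.any_eq_true]
  constructor
  · rintro ⟨m, hm, hb⟩
    by_cases h4 : PySem.Str.len m < 4
    · rw [if_pos h4] at hb; cases hb
    · rw [if_neg h4] at hb
      rw [PySem.Str.len_eq] at h4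
      rw [Bool.or_eq_true] at hb
      rcases hb with hb | hb
      · -- m is a (≥4-long) prefix of some title term
        rw [show ∀ (s : PySem.Set String) x, PySem.Set.contains s x = true ↔ x ∈ s from
          fun s x => by simp [PySem.Set.contains]] at hb
        rw [PySem.Set.mem_ofList, List.mem_flatMap] at hb
        obtain ⟨t, ht, hmem⟩ := hb
        rw [PySem.Set.mem_ofList, List.mem_filter] at ht
        obtain ⟨ht, h4t⟩ := ht
        obtain ⟨h4m', hpre⟩ := (pv_mem_prefixes4 m t).mp hmem
        rw [decide_eq_true_iff, PySem.Str.len_eq] at h4t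
        exact ⟨m, hm, t, ht, by omega, by omega, Or.inl hpre⟩
      · -- some title term is a (≥4-long) prefix of m
        rw [List.any_eq_true] at hb
        obtain ⟨i, hi, hb⟩ := hb
        rw [show ∀ (s : PySem.Set String) x, PySem.Set.contains s x = true ↔ x ∈ s from
          fun s x => by simp [PySem.Set.contains]] at hb
        rw [PySem.Set.mem_ofList, List.mem_filter] at hb
        obtain ⟨ht, h4t⟩ := hb
        rw [decide_eq_true_iff, PySem.Str.len_eq] at h4t
        have hmem : PySem.Str.slice m none (some i) ∈ pvPrefixes4 m := by
          unfold pvPrefixes4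
          exact List.mem_map.mpr ⟨i, hi, rfl⟩
        obtain ⟨_, hpre⟩ := (pv_mem_prefixes4 _ m).mp hmem
        exact ⟨m, hm, _, ht, by omega, by omega, Or.inr hpre⟩
  · rintro ⟨m, hm, t, ht, h4m, h4t, hp⟩
    refine ⟨m, hm, ?_⟩
    rw [if_neg (by rw [PySem.Str.len_eq]; omega), Bool.or_eq_true]
    have htf : t ∈ title_terms.filter (fun t => decide (4 ≤ PySem.Str.len t)) := by
      rw [List.mem_filter, decide_eq_true_iff, PySem.Str.len_eq]
      exact ⟨ht, by omega⟩
    rcases hp with hp | hp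
    · -- m ∈ title_prefixes
      left
      rw [show ∀ (s : PySem.Set String) x, PySem.Set.contains s x = true ↔ x ∈ s from
        fun s x => by simp [PySem.Set.contains]]
      rw [PySem.Set.mem_ofList, List.mem_flatMap]
      exact ⟨t, (PySem.Set.mem_ofList _ _).mpr htf, (pv_mem_prefixes4 m t).mpr ⟨h4m, hp⟩⟩
    · -- t = m[:len(t)] ∈ titles4
      right
      rw [List.any_eq_true]
      obtain ⟨i, hi, heq⟩ := List.mem_map.mp ((pv_mem_prefixes4 t m).mpr ⟨h4t, hp⟩)
      refine ⟨i, hi, ?_⟩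
      rw [show ∀ (s : PySem.Set String) x, PySem.Set.contains s x = true ↔ x ∈ s from
        fun s x => by simp [PySem.Set.contains]]
      rw [heq]
      exact (PySem.Set.mem_ofList _ _).mpr htf

-- ===== VERDICT (by name: the statement is the Claim_ definition above) =====
theorem has_term_overlap_py_spec : Claim_equal_has_term_overlap_py := by
  intro title_terms msg_terms _
  unfold Spec_has_term_overlap_py
  exact Bool.eq_iff_iff.mpr ((pv_A_iff title_terms msg_terms).trans (pv_B_iff title_terms msg_terms).symm)
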